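-- pv_equiv track=rewrite | github.com/vito-AM/ecommerce_website | message_analyzer.py | detect_negation_context
-- ===== SOURCE A (Python) =====
-- def detect_negation_context(text):
--     """Detects negation contexts with English negation markers"""
--     # English negation markers
--     negation_words = {
--         'not', 'no', 'never', 'none', 'nothing', 'nowhere', 'neither',
--         'cant', 'cannot', "can't", "won't", "wouldn't", "shouldn't",
--         "isn't", "aren't", "wasn't", "weren't", "haven't", "hasn't",
--         "hadn't", "doesn't", "don't", "didn't", 'without', 'nobody',
--         'never', 'none', 'nor', 'nothing', 'nowhere'
--     }
--
--     # Scope-ending markers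
--     scope_enders = {'.', ',', 'but', 'however', 'nevertheless', 'yet',
--                    'although', 'though', ';', '!', '?'}
--
--     words = text.lower().split()
--     negation_contexts = []
--     current_context = []
--     in_negation = False
--
--     for i, word in enumerate(words):
--         if word in negation_words:
--             in_negation = True
--
--         if in_negation:
--             current_context.append(word)
--
--             # Check if next word exists and is a scope ender
--             if i < len(words) - 1:
--                 next_word = words[i + 1]
--                 if next_word in scope_enders:
--                     if current_context:
--                         negation_contexts.append(current_context)
--                         current_context = []
--                     in_negation = False
--
--             # Limit negation scope to 6 words
--             if len(current_context) >= 6: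
--                 negation_contexts.append(current_context)
--                 current_context = []
--                 in_negation = False
--
--     if current_context:
--         negation_contexts.append(current_context)
--
--     return negation_contexts
-- ===== SOURCE B (Python) =====
-- def detect_negation_context(text):
--     """Detects negation contexts with English negation markers"""
--     negation_words = {
--         'not', 'no', 'never', 'none', 'nothing', 'nowhere', 'neither',
--         'cant', 'cannot', "can't", "won't", "wouldn't", "shouldn't",
--         "isn't", "aren't", "wasn't", "weren't", "haven't", "hasn't",
--         "hadn't", "doesn't", "don't", "didn't", 'without', 'nobody',
--         'nor'
--     }
--     scope_enders = {'.', ',', 'but', 'however', 'nevertheless', 'yet',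
--                     'although', 'though', ';', '!', '?'}
--
--     words = text.lower().split()
--     n = len(words)
--     res = []
--     i = 0
--     while i < n:
--         if words[i] not in negation_words:
--             i += 1
--             continue
--         # collect a negation scope starting at words[i]
--         group = []
--         j = i
--         while j < n:
--             group.append(words[j])
--             if j + 1 < n and words[j + 1] in scope_enders:
--                 break
--             if len(group) >= 6:
--                 break
--             j += 1
--         res.append(group)
--         i = j + 1
--     return res
-- ===== Notes on version B (the rewrite author's own statement) =====
-- stated objective: alternative
-- what changed: Replaces A's flat single loop over enumerate(words) with flag state (in_negation, current_context) by a two-level index loop: an outer scan that finds the next negation word and an inner loop that collects one scope group (stopping at a scope-ender lookahead or at 6 words) and resumes the outer scan after the group.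
import Mathlib
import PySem

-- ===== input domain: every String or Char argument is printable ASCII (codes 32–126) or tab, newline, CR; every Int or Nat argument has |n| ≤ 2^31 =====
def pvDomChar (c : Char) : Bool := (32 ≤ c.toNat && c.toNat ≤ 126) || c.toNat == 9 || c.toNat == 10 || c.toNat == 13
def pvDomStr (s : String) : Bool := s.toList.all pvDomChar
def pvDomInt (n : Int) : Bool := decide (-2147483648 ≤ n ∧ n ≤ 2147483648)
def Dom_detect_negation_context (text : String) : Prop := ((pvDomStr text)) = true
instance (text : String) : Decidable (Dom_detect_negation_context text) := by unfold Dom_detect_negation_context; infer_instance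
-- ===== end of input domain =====

-- B replaces A's flat single loop with flag state by a find-negation / collect-scope two-level
-- index recursion (objective: alternative decomposition, same cost).

-- shared constants: the two Python set literals (duplicates in A's literal are kept; ofList dedups)
def pvNegWords : PySem.Set String := PySem.Set.ofList
  ["not", "no", "never", "none", "nothing", "nowhere", "neither",
   "cant", "cannot", "can't", "won't", "wouldn't", "shouldn't",
   "isn't", "aren't", "wasn't", "weren't", "haven't", "hasn't",
   "hadn't", "doesn't", "don't", "didn't", "without", "nobody",
   "never", "none", "nor", "nothing", "nowhere"]
def pvScopeEnders : PySem.Set String := PySem.Set.ofList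
  [".", ",", "but", "however", "nevertheless", "yet",
   "although", "though", ";", "!", "?"]

-- ===== PORT A =====
-- one iteration of A's for-loop over enumerate(words); state = (negation_contexts, current_context, in_negation)
def pvAStep (words : List String) (st : List (List String) × List String × Bool)
    (p : Int × String) : List (List String) × List String × Bool :=
  let negation_contexts := st.1
  let current_context := st.2.1
  let in_negation := st.2.2 || PySem.Set.contains pvNegWords p.2
  if in_negation then
    let current_context := current_context ++ [p.2]
    -- check if next word exists and is a scope ender
    let st1 :=
      if p.1 < (words.length : Int) - 1 then
        let next_word := PySem.List.pyGetD words (p.1 + 1) ""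
        if PySem.Set.contains pvScopeEnders next_word then
          ((if current_context.isEmpty then negation_contexts
            else negation_contexts ++ [current_context]), ([] : List String), false)
        else (negation_contexts, current_context, true)
      else (negation_contexts, current_context, true)
    -- limit negation scope to 6 words
    if st1.2.1.length ≥ 6 then (st1.1 ++ [st1.2.1], ([] : List String), false)
    else st1
  else (negation_contexts, current_context, in_negation)

def detect_negation_context (text : String) : List (List String) :=
  let words := PySem.Str.split₀ (PySem.Str.lower text)
  let st := (PySem.List.enumerate words 0).foldl (pvAStep words) ([], [], false)
  if st.2.1.isEmpty then st.1 else st.1 ++ [st.2.1]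

-- ===== PORT B =====
-- inner while-loop of Source B: collect the scope group starting at j; returns (group, next outer index).
-- fuel = words.length - j makes the recursion structural; it never runs out while j < words.length
def pvBInnerGo (words : List String) : Nat → List String → Nat → List String × Nat
  | 0, group, j => (group, j + 1)
  | fuel + 1, group, j =>
    if h : j < words.length then
      let group := group ++ [words[j]]
      if decide (j + 1 < words.length) && PySem.Set.contains pvScopeEnders (words.getD (j + 1) "") then
        (group, j + 1)
      else if group.length ≥ 6 then (group, j + 1)
      else pvBInnerGo words fuel group (j + 1)
    else (group, j + 1)

def pvBInner (words : List String) (group : List String) (j : Nat) : List String × Nat :=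
  pvBInnerGo words (words.length - j) group j

-- outer while-loop of Source B: scan for a negation word, then extract one group and resume after it
def pvBOuterGo (words : List String) : Nat → Nat → List (List String)
  | 0, _ => []
  | fuel + 1, i =>
    if h : i < words.length then
      if PySem.Set.contains pvNegWords words[i] then
        (pvBInner words [] i).1 :: pvBOuterGo words fuel (pvBInner words [] i).2
      else pvBOuterGo words fuel (i + 1)
    else []

def pvBOuter (words : List String) (i : Nat) : List (List String) :=
  pvBOuterGo words (words.length - i) i

def detect_negation_context_alt (text : String) : List (List String) :=
  pvBOuter (PySem.Str.split₀ (PySem.Str.lower text)) 0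

-- ===== PRECONDITION & SPEC =====
def Spec_detect_negation_context (text : String) (out : List (List String)) : Prop := out = detect_negation_context_alt text
instance (text : String) (out : List (List String)) : Decidable (Spec_detect_negation_context text out) := by unfold Spec_detect_negation_context; infer_instance

-- ===== CLAIM (what is proved, stated in full; the proofs are below) =====
def Claim_equal_detect_negation_context : Prop := ∀ (text : String), Dom_detect_negation_context text → Spec_detect_negation_context text (detect_negation_context text)

-- ===== LEMMAS AND PROOFS =====

-- A's post-loop flush
def pvFinish (st : List (List String) × List String × Bool) : List (List String) :=
  if st.2.1.isEmpty then st.1 else st.1 ++ [st.2.1]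

-- one-step unfolding of the fuelled loops (the fuel is invisible at or above words.length - index)
theorem pvBInnerGo_snd_lt (words : List String) : ∀ (fuel : Nat) (group : List String) (j : Nat),
    j < (pvBInnerGo words fuel group j).2 := by
  intro fuel
  induction fuel with
  | zero => intro group j; simp [pvBInnerGo]
  | succ f ih =>
    intro group j
    by_cases h : j < words.length
    · simp only [pvBInnerGo, dif_pos h]
      split_ifs <;> first | simp | exact Nat.lt_of_succ_lt (ih _ _)
    · simp [pvBInnerGo, h]

theorem pvBInner_eq (words : List String) (group : List String) (j : Nat) :
    pvBInner words group j =
      if h : j < words.length then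
        if decide (j + 1 < words.length) && PySem.Set.contains pvScopeEnders (words.getD (j + 1) "") then
          (group ++ [words[j]], j + 1)
        else if (group ++ [words[j]]).length ≥ 6 then (group ++ [words[j]], j + 1)
        else pvBInner words (group ++ [words[j]]) (j + 1)
      else (group, j + 1) := by
  by_cases h : j < words.length
  · have hfuel : words.length - j = (words.length - (j + 1)) + 1 := by omega
    rw [pvBInner, hfuel]
    simp only [pvBInnerGo, dif_pos h]
    rfl
  · have hfuel : words.length - j = 0 := by omega
    rw [pvBInner, hfuel]
    simp [pvBInnerGo, h]

theorem pvBInner_snd_lt (words : List String) (group : List String) (j : Nat) :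
    j < (pvBInner words group j).2 :=
  pvBInnerGo_snd_lt words _ group j

theorem pvBOuter_eq (words : List String) (i : Nat) :
    pvBOuter words i =
      if h : i < words.length then
        if PySem.Set.contains pvNegWords words[i] then
          (pvBInner words [] i).1 :: pvBOuter words (pvBInner words [] i).2
        else pvBOuter words (i + 1)
      else [] := by
  have congrGo : ∀ (f g k : Nat), words.length - k ≤ f → words.length - k ≤ g →
      pvBOuterGo words f k = pvBOuterGo words g k := by
    intro f
    induction f with
    | zero =>
      intro g k hf hg
      have hk : ¬ k < words.length := by omega
      cases g <;> simp [pvBOuterGo, hk]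
    | succ f ih =>
      intro g k hf hg
      by_cases hk : k < words.length
      · cases g with
        | zero => omega
        | succ g' =>
          simp only [pvBOuterGo, dif_pos hk]
          by_cases hm : PySem.Set.contains pvNegWords words[k] = true
          · have hlt := pvBInner_snd_lt words [] k
            simp only [hm, if_true]
            rw [ih g' (pvBInner words [] k).2 (by omega) (by omega)]
          · simp only [hm, Bool.false_eq_true, if_false]
            exact ih g' (k + 1) (by omega) (by omega)
      · cases g <;> simp [pvBOuterGo, hk]
  by_cases h : i < words.length
  · have hfuel : words.length - i = (words.length - (i + 1)) + 1 := by omega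
    rw [pvBOuter, hfuel]
    simp only [pvBOuterGo, dif_pos h]
    by_cases hm : PySem.Set.contains pvNegWords words[i] = true
    · have hlt := pvBInner_snd_lt words [] i
      simp only [hm, if_true]
      rw [congrGo (words.length - (i + 1)) (words.length - (pvBInner words [] i).2)
        (pvBInner words [] i).2 (by omega) (by omega)]
      rfl
    · simp only [hm, Bool.false_eq_true, if_false]
      exact congrGo (words.length - (i + 1)) (words.length - (i + 1)) (i + 1) (by omega) (by omega)
  · have hfuel : words.length - i = 0 := by omega
    rw [pvBOuter, hfuel]
    simp [pvBOuterGo, h]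

theorem pvBOuter_stop (words : List String) (i : Nat) (h : words.length ≤ i) :
    pvBOuter words i = [] := by
  rw [pvBOuter, Nat.sub_eq_zero_of_le h]
  rfl

-- the two loop shapes agree from any position s: conjunct 1 = scanning state (flag off, group empty),
-- conjunct 2 = collecting state (the current word will be appended)
set_option maxRecDepth 4096 in
theorem pvMain (words : List String) (k : Nat) : ∀ (s : Nat) (acc : List (List String)),
    words.length - s ≤ k →
    (pvFinish ((PySem.List.enumerate (words.drop s) s).foldl (pvAStep words) (acc, [], false))
       = acc ++ pvBOuter words s)
    ∧ (∀ (cur : List String) (flag : Bool) (hs : s < words.length),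
        cur.length ≤ 5 → (flag || PySem.Set.contains pvNegWords words[s]) = true →
        pvFinish ((PySem.List.enumerate (words.drop s) s).foldl (pvAStep words) (acc, cur, flag))
          = acc ++ (pvBInner words cur s).1 :: pvBOuter words (pvBInner words cur s).2) := by
  induction k with
  | zero =>
    intro s acc hk
    have hs : words.length ≤ s := by omega
    refine ⟨?_, fun cur flag hslt _ _ => absurd hslt (by omega)⟩
    simp [List.drop_eq_nil_of_le hs, pvFinish, pvBOuter_stop words s (by omega)]
  | succ k ih =>
    intro s acc hk
    by_cases hs : s < words.length
    · have hdrop : words.drop s = words[s] :: words.drop (s + 1) := List.drop_eq_getElem_cons hs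
      have hcast : ((s : Int)) + 1 = (((s + 1 : Nat)) : Int) := by push_cast; ring
      have hIN : ∀ (cur : List String) (flag : Bool),
          cur.length ≤ 5 → (flag || PySem.Set.contains pvNegWords words[s]) = true →
          pvFinish ((PySem.List.enumerate (words.drop s) s).foldl (pvAStep words) (acc, cur, flag))
            = acc ++ (pvBInner words cur s).1 :: pvBOuter words (pvBInner words cur s).2 := by
        intro cur flag hlen hflag
        have hcond : flag = true ∨ words[s] ∈ pvNegWords := by
          cases flag
          · right; simpa using hflag
          · left; rfl
        rw [hdrop, PySem.List.enumerate_cons, List.foldl_cons]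
        by_cases hnext : s + 1 < words.length
        · have hlt : ((s : Int)) < (words.length : Int) - 1 := by omega
          have hget : PySem.List.pyGetD words ((s : Int) + 1) "" = words.getD (s + 1) "" := by
            rw [hcast, PySem.List.pyGetD_natCast]
          by_cases hend : words[s + 1] ∈ pvScopeEnders
          · -- a scope ender follows: both sides flush the group and resume at s + 1
            have hA : pvAStep words (acc, cur, flag) ((s : Int), words[s])
                = (acc ++ [cur ++ [words[s]]], [], false) := by
              simp [pvAStep, if_pos hlt, hget, hnext, hend]
              intro hf; simpa [hf] using hflag
            have hB : pvBInner words cur s = (cur ++ [words[s]], s + 1) := by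
              rw [pvBInner_eq]; simp [hs, hnext, hend]
            rw [hA, hB, hcast, (ih (s + 1) (acc ++ [cur ++ [words[s]]]) (by omega)).1]
            simp
          · by_cases h6 : 5 ≤ cur.length
            · -- the group reaches 6 words: both sides flush and resume at s + 1
              have hA : pvAStep words (acc, cur, flag) ((s : Int), words[s])
                  = (acc ++ [cur ++ [words[s]]], [], false) := by
                simp [pvAStep, hget, hnext, hend]
                rw [if_pos hcond, if_pos h6]
              have hB : pvBInner words cur s = (cur ++ [words[s]], s + 1) := by
                rw [pvBInner_eq]
                simp [hs, hnext, hend]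
                try (intro hc; exact absurd hc (by omega))
              rw [hA, hB, hcast, (ih (s + 1) (acc ++ [cur ++ [words[s]]]) (by omega)).1]
              simp
            · -- keep collecting
              have hA : pvAStep words (acc, cur, flag) ((s : Int), words[s])
                  = (acc, cur ++ [words[s]], true) := by
                simp [pvAStep, hget, hnext, hend]
                rw [if_pos hcond, if_neg h6]
              have hB : pvBInner words cur s = pvBInner words (cur ++ [words[s]]) (s + 1) := by
                rw [pvBInner_eq]
                simp [hs, hnext, hend]
                try (intro hc; exact absurd hc (by omega))
              rw [hA, hB, hcast]
              exact (ih (s + 1) acc (by omega)).2 (cur ++ [words[s]]) true hnext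
                (by simp; omega) (by simp)
        · -- s is the last word: no lookahead; the loop ends after this iteration
          have hlt : ¬ ((s : Int)) < (words.length : Int) - 1 := by omega
          have hdropnil : words.drop (s + 1) = [] := List.drop_eq_nil_of_le (by omega)
          by_cases h6 : 5 ≤ cur.length
          · have hA : pvAStep words (acc, cur, flag) ((s : Int), words[s])
                = (acc ++ [cur ++ [words[s]]], [], false) := by
              simp [pvAStep, if_neg hlt]
              try rw [if_pos hcond, if_pos h6]
            have hB : pvBInner words cur s = (cur ++ [words[s]], s + 1) := by
              rw [pvBInner_eq]
              simp [hs, hnext]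
              try (intro hc; exact absurd hc (by omega))
            rw [hA, hB, hdropnil]
            simp [PySem.List.enumerate, pvFinish, pvBOuter_stop words (s + 1) (by omega)]
          · have hA : pvAStep words (acc, cur, flag) ((s : Int), words[s])
                = (acc, cur ++ [words[s]], true) := by
              simp [pvAStep, if_neg hlt]
              try rw [if_pos hcond, if_neg h6]
            have hB : pvBInner words cur s = (cur ++ [words[s]], s + 1 + 1) := by
              rw [pvBInner_eq]
              simp [hs, hnext, h6]
              rw [pvBInner_eq]
              simp [hnext]
            rw [hA, hB, hdropnil]
            have h2 : ¬ s + 1 + 1 < words.length := by omega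
            simp [PySem.List.enumerate, pvFinish, pvBOuter_stop words (s + 1 + 1) (by omega)]
      refine ⟨?_, fun cur flag _ => hIN cur flag⟩
      by_cases hneg : words[s] ∈ pvNegWords
      · rw [hIN [] false (by simp) (by simp [hneg])]
        conv_rhs => rw [pvBOuter_eq]
        simp [hs, hneg]
      · have hA : pvAStep words (acc, [], false) ((s : Int), words[s])
            = (acc, [], false) := by
          simp [pvAStep, hneg]
        rw [hdrop, PySem.List.enumerate_cons, List.foldl_cons, hA, hcast,
          (ih (s + 1) acc (by omega)).1]
        conv_rhs => rw [pvBOuter_eq]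
        simp [hs, hneg]
    · have hs' : words.length ≤ s := by omega
      refine ⟨?_, fun cur flag hslt _ _ => absurd hslt (by omega)⟩
      simp [List.drop_eq_nil_of_le hs', pvFinish, pvBOuter_stop words s (by omega)]

-- ===== VERDICT (by name: the statement is the Claim_ definition above) =====
theorem detect_negation_context_spec : Claim_equal_detect_negation_context := by
  intro text _
  unfold Spec_detect_negation_context detect_negation_context detect_negation_context_alt
  have h := (pvMain (PySem.Str.split₀ (PySem.Str.lower text)) (PySem.Str.split₀ (PySem.Str.lower text)).length 0 [] (by omega)).1
  simpa [pvFinish] using h
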